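-- pv_equiv track=rewrite | github.com/hanghea99/hanghea-algorithm | suzy/03.stackQueue/leetcode316_removeDuplicateLetters.py | removeDuplicateLetters_deque
-- ===== SOURCE A (Python) =====
-- import collections
--
-- def removeDuplicateLetters_deque(s):
--     deq = collections.deque([])
--
--     for char in s:
--         if char in deq:
--             deq.remove(char)
--             deq.append(char)
--         else:
--             deq.append(char)
--
--     return "".join(deq)
-- ===== SOURCE B (Python) =====
-- def removeDuplicateLetters_deque(s):
--     # Reverse scan keeping the FIRST occurrence seen (= last occurrence in s),
--     # then reverse the result: O(n) instead of A's O(n^2) remove-and-append.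
--     seen = set()
--     out = []
--     for ch in reversed(s):
--         if ch not in seen:
--             seen.add(ch)
--             out.append(ch)
--     return "".join(reversed(out))
-- ===== Notes on version B (the rewrite author's own statement) =====
-- stated objective: faster
-- what changed: Single reverse pass keeping the first-seen (i.e. last in s) occurrence of each character with a hash set, then reversed, replacing A's per-character deque membership test plus remove.
import Mathlib
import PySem

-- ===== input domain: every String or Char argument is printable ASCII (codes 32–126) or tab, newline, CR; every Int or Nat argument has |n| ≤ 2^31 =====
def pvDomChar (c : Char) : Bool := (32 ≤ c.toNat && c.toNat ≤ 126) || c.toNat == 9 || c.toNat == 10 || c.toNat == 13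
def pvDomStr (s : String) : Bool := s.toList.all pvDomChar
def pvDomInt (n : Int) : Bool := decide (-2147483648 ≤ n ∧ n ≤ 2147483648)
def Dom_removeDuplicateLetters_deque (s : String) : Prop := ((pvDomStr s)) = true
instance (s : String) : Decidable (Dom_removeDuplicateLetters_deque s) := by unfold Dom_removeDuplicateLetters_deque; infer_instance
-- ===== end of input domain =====

-- B replaces A's quadratic deque membership-test/remove loop by one reverse pass with a seen-set (faster in a timing run).

-- ===== PORT A =====
-- for char in s: if char in deq: deq.remove(char); deq.append(char) else: deq.append(char); return "".join(deq)
def removeDuplicateLetters_deque (s : String) : String :=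
  String.ofList (s.toList.foldl
    (fun deq c =>
      if deq.contains c then ((PySem.List.remove? deq c).getD deq) ++ [c]
      else deq ++ [c]) [])

-- ===== PORT B =====
-- seen = set(); out = []; for ch in reversed(s): if ch not in seen: seen.add(ch); out.append(ch); return "".join(reversed(out))
def removeDuplicateLetters_deque_alt (s : String) : String :=
  String.ofList (s.toList.reverse.foldl
    (fun (p : PySem.Set Char × List Char) c =>
      if PySem.Set.contains p.1 c then p else (PySem.Set.add p.1 c, p.2 ++ [c]))
    (PySem.Set.empty, [])).2.reverse

-- ===== PRECONDITION & SPEC =====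
def Spec_removeDuplicateLetters_deque (s : String) (out : String) : Prop := out = removeDuplicateLetters_deque_alt s
instance (s : String) (out : String) : Decidable (Spec_removeDuplicateLetters_deque s out) := by unfold Spec_removeDuplicateLetters_deque; infer_instance

-- ===== CLAIM (what is proved, stated in full; the proofs are below) =====
def Claim_equal_removeDuplicateLetters_deque : Prop := ∀ (s : String), Dom_removeDuplicateLetters_deque s → Spec_removeDuplicateLetters_deque s (removeDuplicateLetters_deque s)

-- ===== LEMMAS AND PROOFS =====

-- erasing one copy of c from the prefix does not change dedup when c reappears in the suffix
theorem pv_erase_dedup (c : Char) (r : List Char) (hc : c ∈ r) :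
    ∀ acc : List Char, (acc.erase c ++ r).dedup = (acc ++ r).dedup := by
  intro acc
  induction acc with
  | nil => simp
  | cons a acc ih =>
    by_cases h : a = c
    · subst h
      rw [List.erase_cons_head, List.cons_append,
        List.dedup_cons_of_mem (by simp [hc])]
    · rw [List.erase_cons_tail (by simp [h]), List.cons_append, List.cons_append]
      by_cases hm : a ∈ acc ++ r
      · rw [List.dedup_cons_of_mem (by
            rcases List.mem_append.1 hm with h1 | h1
            · exact List.mem_append.2 (Or.inl ((List.mem_erase_of_ne h).2 h1))
            · exact List.mem_append.2 (Or.inr h1)),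
          List.dedup_cons_of_mem hm, ih]
      · rw [List.dedup_cons_of_notMem (by
            intro h1
            rcases List.mem_append.1 h1 with h2 | h2
            · exact hm (List.mem_append.2 (Or.inl (List.mem_of_mem_erase h2)))
            · exact hm (List.mem_append.2 (Or.inr h2))),
          List.dedup_cons_of_notMem hm, ih]

-- A's loop computes Mathlib's dedup (distinct chars, ordered by last occurrence)
theorem pv_loopA (l : List Char) : ∀ acc : List Char, acc.Nodup →
    l.foldl (fun deq c =>
      if deq.contains c then ((PySem.List.remove? deq c).getD deq) ++ [c]
      else deq ++ [c]) acc = (acc ++ l).dedup := by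
  induction l with
  | nil => intro acc h; simpa using h.dedup.symm
  | cons c l ih =>
    intro acc h
    rw [List.foldl_cons]
    by_cases hm : c ∈ acc
    · have h1 : (if acc.contains c then ((PySem.List.remove? acc c).getD acc) ++ [c]
          else acc ++ [c]) = acc.erase c ++ [c] := by
        rw [if_pos (by simpa using hm), PySem.List.remove?_eq_some_erase acc c hm, Option.getD_some]
      rw [h1, ih _ (by
          simp only [List.nodup_append, List.nodup_singleton, true_and]
          refine ⟨h.erase c, ?_⟩
          intro a ha b hb
          simp only [List.mem_singleton] at hb
          subst hb
          intro he
          subst he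
          exact h.not_mem_erase ha),
        List.append_assoc, List.singleton_append,
        pv_erase_dedup c (c :: l) (by simp) acc]
    · have h1 : (if acc.contains c then ((PySem.List.remove? acc c).getD acc) ++ [c]
          else acc ++ [c]) = acc ++ [c] := by
        rw [if_neg (by simpa using hm)]
      rw [h1, ih _ (by
          simp only [List.nodup_append, List.nodup_singleton, true_and]
          refine ⟨h, ?_⟩
          intro a ha b hb
          simp only [List.mem_singleton] at hb
          subst hb
          intro he
          subst he
          exact hm ha),
        List.append_assoc, List.singleton_append]

-- B's loop: out is dedup reversed; the seen set tracks membership in the processed chars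
theorem pv_loopB (l : List Char) :
    (l.reverse.foldl
      (fun (p : PySem.Set Char × List Char) c =>
        if PySem.Set.contains p.1 c then p else (PySem.Set.add p.1 c, p.2 ++ [c]))
      (PySem.Set.empty, [])).2 = l.dedup.reverse
    ∧ ∀ x, PySem.Set.contains
        (l.reverse.foldl
          (fun (p : PySem.Set Char × List Char) c =>
            if PySem.Set.contains p.1 c then p else (PySem.Set.add p.1 c, p.2 ++ [c]))
          (PySem.Set.empty, [])).1 x = true ↔ x ∈ l := by
  induction l with
  | nil => simp [PySem.Set.contains, PySem.Set.empty]
  | cons c l ih =>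
    obtain ⟨ih2, ih1⟩ := ih
    rw [List.reverse_cons, List.foldl_append, List.foldl_cons, List.foldl_nil]
    by_cases hm : c ∈ l
    · rw [if_pos ((ih1 c).2 hm)]
      refine ⟨by rw [ih2, List.dedup_cons_of_mem hm], fun x => ?_⟩
      rw [ih1]
      constructor
      · exact fun h => List.mem_cons_of_mem _ h
      · intro h; rcases List.mem_cons.1 h with h | h
        · subst h; exact hm
        · exact h
    · rw [if_neg (by intro h; exact hm ((ih1 c).1 h))]
      refine ⟨by simp only; rw [ih2, List.dedup_cons_of_notMem hm, List.reverse_cons], fun x => ?_⟩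
      have hmem : ∀ (S : PySem.Set Char) (y : Char),
          PySem.Set.contains S y = true ↔ y ∈ S := fun S y => by
        simp [PySem.Set.contains_eq_listContains, List.contains_eq_mem]
      rw [hmem, PySem.Set.mem_add, ← hmem _ x, ih1, List.mem_cons]
      tauto

-- ===== VERDICT (by name: the statement is the Claim_ definition above) =====
theorem removeDuplicateLetters_deque_spec : Claim_equal_removeDuplicateLetters_deque := by
  intro s _
  unfold Spec_removeDuplicateLetters_deque removeDuplicateLetters_deque removeDuplicateLetters_deque_alt
  rw [pv_loopA s.toList [] List.nodup_nil, (pv_loopB s.toList).1]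
  simp
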